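-- pv_equiv track=rewrite | github.com/Muneebranar/fashion-ai-backend | app/services/outfit_service.py | _is_outfit_valid
-- ===== SOURCE A (Python) =====
-- from typing import List, Dict, Optional, Any, Tuple
--
-- def _is_outfit_valid(outfit: Dict, occasion: str) -> bool:
--     """Check if outfit is valid for the occasion"""
--     items = outfit.get("items", [])
--     if len(items) < 2:  # Need at least 2 items
--         return False
--
--     # Check for dress completeness
--     has_dress = any(item.get("category", "").lower() == "dresses" for item in items)
--     if has_dress:
--         # Dress should be standalone or with minimal additions
--         return True
--
--     # For other outfits, need at least top and bottom
--     has_top = any(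
--         item.get("category", "").lower() in ["tops", "shirt", "blouse", "t-shirt", "sweater"]
--         for item in items
--     )
--
--     has_bottom = any(
--         item.get("category", "").lower() in ["bottoms", "pants", "jeans", "skirt", "shorts"]
--         for item in items
--     )
--
--     return has_top and has_bottom
-- ===== SOURCE B (Python) =====
-- _TOPS = ("tops", "shirt", "blouse", "t-shirt", "sweater")
-- _BOTTOMS = ("bottoms", "pants", "jeans", "skirt", "shorts")
--
-- def _is_outfit_valid(outfit, occasion):
--     """Check if outfit is valid for the occasion"""
--     items = outfit.get("items", [])
--     if len(items) < 2:
--         return False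
--     # one short-circuiting pass: stop at the first dress, thread top/bottom flags
--     has_top = False
--     has_bottom = False
--     for item in items:
--         c = item.get("category", "").lower()
--         if c == "dresses":
--             return True
--         has_top = has_top or c in _TOPS
--         has_bottom = has_bottom or c in _BOTTOMS
--     return has_top and has_bottom
-- ===== Notes on version B (the rewrite author's own statement) =====
-- stated objective: alternative
-- what changed: B replaces A's three staged any()-scans by one short-circuiting recursive pass over the items that returns True at the first dress and otherwise threads has_top/has_bottom flag accumulators to the end.
import Mathlib
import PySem

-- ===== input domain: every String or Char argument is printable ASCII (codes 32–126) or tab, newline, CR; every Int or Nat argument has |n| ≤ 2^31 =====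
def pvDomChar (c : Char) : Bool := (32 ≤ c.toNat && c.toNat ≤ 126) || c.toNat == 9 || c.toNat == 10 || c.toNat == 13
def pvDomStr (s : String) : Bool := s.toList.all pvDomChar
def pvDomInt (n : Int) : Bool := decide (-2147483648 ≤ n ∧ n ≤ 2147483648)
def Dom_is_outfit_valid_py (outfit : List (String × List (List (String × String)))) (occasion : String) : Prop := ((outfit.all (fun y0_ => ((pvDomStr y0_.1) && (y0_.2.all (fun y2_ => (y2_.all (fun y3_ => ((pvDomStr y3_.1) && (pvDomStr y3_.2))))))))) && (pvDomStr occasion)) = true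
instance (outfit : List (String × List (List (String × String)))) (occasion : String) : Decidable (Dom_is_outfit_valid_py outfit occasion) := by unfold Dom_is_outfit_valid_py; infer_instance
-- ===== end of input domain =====

-- B replaces A's three staged any()-scans by one short-circuiting recursive pass that
-- returns at the first dress and threads has_top/has_bottom flag accumulators.
-- ===== PORT A =====
def is_outfit_valid_py (outfit : List (String × List (List (String × String)))) (occasion : String) : Bool :=
  let items := PySem.Dict.getD (PySem.Dict.mk outfit) "items" []
  if items.length < 2 then false
  else
    let has_dress := items.any (fun item => PySem.Str.lower (PySem.Dict.getD (PySem.Dict.mk item) "category" "") == "dresses")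
    if has_dress then true
    else
      let has_top := items.any (fun item =>
        ["tops", "shirt", "blouse", "t-shirt", "sweater"].contains
          (PySem.Str.lower (PySem.Dict.getD (PySem.Dict.mk item) "category" "")))
      let has_bottom := items.any (fun item =>
        ["bottoms", "pants", "jeans", "skirt", "shorts"].contains
          (PySem.Str.lower (PySem.Dict.getD (PySem.Dict.mk item) "category" "")))
      has_top && has_bottom

-- ===== PORT B =====
def pvTops : List String := ["tops", "shirt", "blouse", "t-shirt", "sweater"]
def pvBottoms : List String := ["bottoms", "pants", "jeans", "skirt", "shorts"]

def pvScan : List (List (String × String)) → Bool → Bool → Bool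
  | [], has_top, has_bottom => has_top && has_bottom
  | item :: rest, has_top, has_bottom =>
    let c := PySem.Str.lower (PySem.Dict.getD (PySem.Dict.mk item) "category" "")
    if c == "dresses" then true
    else pvScan rest (has_top || pvTops.contains c) (has_bottom || pvBottoms.contains c)

def is_outfit_valid_py_alt (outfit : List (String × List (List (String × String)))) (occasion : String) : Bool :=
  let items := PySem.Dict.getD (PySem.Dict.mk outfit) "items" []
  if items.length < 2 then false
  else pvScan items false false

-- ===== PRECONDITION & SPEC =====
def Spec_is_outfit_valid_py (outfit : List (String × List (List (String × String)))) (occasion : String) (out : Bool) : Prop := out = is_outfit_valid_py_alt outfit occasion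
instance (outfit : List (String × List (List (String × String)))) (occasion : String) (out : Bool) : Decidable (Spec_is_outfit_valid_py outfit occasion out) := by unfold Spec_is_outfit_valid_py; infer_instance

-- ===== CLAIM (what is proved, stated in full; the proofs are below) =====
def Claim_equal_is_outfit_valid_py : Prop := ∀ (outfit : List (String × List (List (String × String)))) (occasion : String), Dom_is_outfit_valid_py outfit occasion → Spec_is_outfit_valid_py outfit occasion (is_outfit_valid_py outfit occasion)

-- ===== LEMMAS AND PROOFS =====
lemma pvScan_eq (items : List (List (String × String))) (ht hb : Bool) :
    pvScan items ht hb
      = ((items.any (fun item => PySem.Str.lower (PySem.Dict.getD (PySem.Dict.mk item) "category" "") == "dresses"))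
        || ((ht || items.any (fun item => pvTops.contains (PySem.Str.lower (PySem.Dict.getD (PySem.Dict.mk item) "category" ""))))
          && (hb || items.any (fun item => pvBottoms.contains (PySem.Str.lower (PySem.Dict.getD (PySem.Dict.mk item) "category" "")))))) := by
  induction items generalizing ht hb with
  | nil => simp [pvScan]
  | cons item rest ih =>
    simp only [pvScan, List.any_cons]
    by_cases h : (PySem.Str.lower (PySem.Dict.getD (PySem.Dict.mk item) "category" "") == "dresses") = true
    · simp [h]
    · simp only [h, Bool.false_eq_true, if_false, ih]
      cases hB : (PySem.Str.lower (PySem.Dict.getD (PySem.Dict.mk item) "category" "") == "dresses") <;>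
        simp_all <;> ac_rfl

-- ===== VERDICT (by name: the statement is the Claim_ definition above) =====
theorem is_outfit_valid_py_spec : Claim_equal_is_outfit_valid_py := by
  intro outfit occasion _
  unfold Spec_is_outfit_valid_py is_outfit_valid_py is_outfit_valid_py_alt
  simp only [pvScan_eq, Bool.false_or]
  split
  · rfl
  · split <;> simp_all [pvTops, pvBottoms]
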